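-- pv_equiv track=rewrite | github.com/jaxzin/jaxzin-infra-bootstrap | tests/check_docker_tasks.py | split_into_task_blocks
-- ===== SOURCE A (Python) =====
-- def split_into_task_blocks(lines):
--     """Split file lines into task blocks. Each block starts with '- name:'.
--
--     Only splits on '- name:' at indent <= 4, which covers top-level tasks
--     (indent 0) and tasks inside block:/rescue:/always: (indent 2-4).
--     Deeper '- name:' entries (e.g. inside networks: list) are not boundaries.
--     """
--     blocks = []
--     current = []
--     for line in lines:
--         stripped = line.lstrip()
--         indent = len(line) - len(line.lstrip())
--         if stripped.startswith("- name:") and indent <= 4 and current: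
--             blocks.append(current)
--             current = []
--         current.append(line)
--     if current:
--         blocks.append(current)
--     return blocks
-- ===== SOURCE B (Python) =====
-- def split_into_task_blocks(lines):
--     """Build the blocks back-to-front: walk reversed(lines), merging each line
--     into the following block unless that block starts at a '- name:' boundary.
--     Blocks and their lines are collected in reverse order (O(1) appends) and
--     un-reversed once at the end."""
--     def is_boundary(line):
--         stripped = line.lstrip()
--         return stripped.startswith("- name:") and len(line) - len(stripped) <= 4
--     rev = []  # blocks in reverse order; each block's lines in reverse order
--     for line in reversed(lines):
--         if rev and not is_boundary(rev[-1][-1]):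
--             rev[-1].append(line)
--         else:
--             rev.append([line])
--     return [b[::-1] for b in reversed(rev)]
-- ===== Notes on version B (the rewrite author's own statement) =====
-- stated objective: alternative
-- what changed: Replaces A's forward scan with a rolling 'current' buffer plus a final flush by a back-to-front pass over reversed(lines) that merges each line into the following block unless that block starts at a boundary, collecting everything in reverse and un-reversing once at the end.
import Mathlib
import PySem

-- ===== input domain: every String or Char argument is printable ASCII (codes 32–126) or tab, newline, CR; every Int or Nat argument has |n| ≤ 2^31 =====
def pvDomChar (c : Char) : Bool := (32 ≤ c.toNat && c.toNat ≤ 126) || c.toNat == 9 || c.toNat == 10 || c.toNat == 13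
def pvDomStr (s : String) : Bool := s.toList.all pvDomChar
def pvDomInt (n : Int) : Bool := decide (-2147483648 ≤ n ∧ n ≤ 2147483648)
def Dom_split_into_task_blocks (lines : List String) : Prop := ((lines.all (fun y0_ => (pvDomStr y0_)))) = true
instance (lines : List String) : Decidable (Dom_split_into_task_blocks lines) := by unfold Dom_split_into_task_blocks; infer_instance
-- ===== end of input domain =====

-- B builds the blocks back-to-front with a single foldr (no 'current' buffer, no final flush); same O(n) cost, alternative decomposition.

-- ===== PORT A =====
-- A's loop body: split off 'current' when the line is a '- name:' boundary (indent <= 4) and current is nonempty.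
def pvStepA (st : List (List String) × List String) (line : String) : List (List String) × List String :=
  if PySem.Str.startswith (PySem.Str.lstrip line) "- name:"
      && decide (PySem.Str.len line - PySem.Str.len (PySem.Str.lstrip line) ≤ 4)
      && !st.2.isEmpty then
    (st.1 ++ [st.2], [line])
  else
    (st.1, st.2 ++ [line])

def split_into_task_blocks (lines : List String) : List (List String) :=
  let st := lines.foldl pvStepA ([], [])
  if st.2.isEmpty then st.1 else st.1 ++ [st.2]

-- ===== PORT B =====
def pvIsBoundary (line : String) : Bool :=
  PySem.Str.startswith (PySem.Str.lstrip line) "- name:"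
    && decide (PySem.Str.len line - PySem.Str.len (PySem.Str.lstrip line) ≤ 4)

-- B's loop body over reversed(lines); rev[-1] (the most recently opened block) is never empty
-- in B's run, so rev[-1][-1] is ported exactly by getLastD "".
def pvStepRev (rev : List (List String)) (line : String) : List (List String) :=
  match rev.getLast? with
  | some b =>
    if !pvIsBoundary (b.getLastD "") then rev.dropLast ++ [b ++ [line]]
    else rev ++ [[line]]
  | none => rev ++ [[line]]

-- b[::-1] and reversed(rev) are ported as List.reverse (exact)
def split_into_task_blocks_alt (lines : List String) : List (List String) :=
  ((lines.reverse.foldl pvStepRev []).reverse).map (fun b => b.reverse)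

-- ===== PRECONDITION & SPEC =====
def Spec_split_into_task_blocks (lines : List String) (out : List (List String)) : Prop := out = split_into_task_blocks_alt lines
instance (lines : List String) (out : List (List String)) : Decidable (Spec_split_into_task_blocks lines out) := by unfold Spec_split_into_task_blocks; infer_instance

-- ===== CLAIM (what is proved, stated in full; the proofs are below) =====
def Claim_equal_split_into_task_blocks : Prop := ∀ (lines : List String), Dom_split_into_task_blocks lines → Spec_split_into_task_blocks lines (split_into_task_blocks lines)

-- ===== LEMMAS AND PROOFS =====

-- the cons-based right fold both ports are proved equal to (proof-only helper)
def pvStepB (line : String) (blocks : List (List String)) : List (List String) :=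
  match blocks with
  | [] => [[line]]
  | b :: bs =>
    if !pvIsBoundary (b.headD "") then (line :: b) :: bs
    else [line] :: b :: bs

-- A's trailing flush, as a function (proof-only helper).
def pvFin (st : List (List String) × List String) : List (List String) :=
  if st.2.isEmpty then st.1 else st.1 ++ [st.2]

-- What A computes from state ([], cur) on the remaining lines, expressed via B's fold.
def pvAttach (cur : List String) (rest : List String) : List (List String) :=
  match rest with
  | [] => [cur]
  | r :: rs =>
    match (r :: rs).foldr pvStepB [] with
    | [] => [cur]
    | b :: bs => if pvIsBoundary r then cur :: b :: bs else (cur ++ b) :: bs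

theorem pvStepA_eq (bl : List (List String)) (cur : List String) (line : String) :
    pvStepA (bl, cur) line =
      if pvIsBoundary line && !cur.isEmpty then (bl ++ [cur], [line]) else (bl, cur ++ [line]) := rfl

-- the first block of B's result starts with the first line
theorem pvFoldrB_head (s : String) (ss : List String) :
    ∃ t bs, (s :: ss).foldr pvStepB [] = (s :: t) :: bs := by
  cases h : ss.foldr pvStepB [] with
  | nil => exact ⟨[], [], by simp [List.foldr, h, pvStepB]⟩
  | cons b bs =>
    by_cases hb : pvIsBoundary (b.headD "")
    · exact ⟨[], b :: bs, by cases b <;> simp_all [List.foldr, pvStepB]⟩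
    · exact ⟨b, bs, by cases b <;> simp_all [List.foldr, pvStepB]⟩

theorem pvAttach_cons (cur : List String) (r : String) (rs t : List String)
    (bs : List (List String)) (h : (r :: rs).foldr pvStepB [] = (r :: t) :: bs) :
    pvAttach cur (r :: rs) =
      if pvIsBoundary r then cur :: (r :: t) :: bs else (cur ++ (r :: t)) :: bs := by
  simp only [pvAttach]
  rw [h]

theorem pvStepB_attach (r : String) (rs : List String) :
    pvStepB r (rs.foldr pvStepB []) = pvAttach [r] rs := by
  cases rs with
  | nil => simp [pvStepB, pvAttach]
  | cons s ss =>
    obtain ⟨t, bs, h⟩ := pvFoldrB_head s ss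
    by_cases hb : pvIsBoundary s
    · simp [pvAttach, h, pvStepB, hb]
    · simp [pvAttach, h, pvStepB, hb]

-- A's accumulated blocks are a prefix that the rest of the loop only appends to
theorem pvA_prefix (rs : List String) : ∀ (bl : List (List String)) (cur : List String), cur ≠ [] →
    pvFin (rs.foldl pvStepA (bl, cur)) = bl ++ pvFin (rs.foldl pvStepA ([], cur)) := by
  induction rs with
  | nil =>
    intro bl cur hc
    simp [pvFin, List.isEmpty_iff, hc]
  | cons r rs ih =>
    intro bl cur hc
    simp only [List.foldl_cons, pvStepA_eq]
    by_cases hb : pvIsBoundary r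
    · rw [if_pos (by simp [hb, hc]), if_pos (by simp [hb, hc])]
      simp only [List.nil_append]
      rw [ih (bl ++ [cur]) [r] (by simp), ih [cur] [r] (by simp)]
      simp
    · rw [if_neg (by simp [hb]), if_neg (by simp [hb])]
      exact ih bl (cur ++ [r]) (by simp)

theorem pvA_attach (rs : List String) : ∀ (cur : List String), cur ≠ [] →
    pvFin (rs.foldl pvStepA ([], cur)) = pvAttach cur rs := by
  induction rs with
  | nil =>
    intro cur hc
    simp [pvFin, pvAttach, List.isEmpty_iff, hc]
  | cons r rs ih =>
    intro cur hc
    simp only [List.foldl_cons, pvStepA_eq]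
    by_cases hb : pvIsBoundary r
    · rw [if_pos (by simp [hb, hc])]
      simp only [List.nil_append]
      rw [pvA_prefix rs [cur] [r] (by simp), ih [r] (by simp)]
      obtain ⟨t, bs, h⟩ := pvFoldrB_head r rs
      have hP : pvAttach [r] rs = (r :: t) :: bs := by
        rw [← pvStepB_attach r rs]; simpa using h
      rw [hP, pvAttach_cons cur r rs t bs h, if_pos hb]
      rfl
    · rw [if_neg (by simp [hb])]
      rw [ih (cur ++ [r]) (by simp)]
      cases rs with
      | nil =>
        simp [pvAttach, List.foldr, pvStepB, hb]
      | cons s ss =>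
        obtain ⟨u, cs, hs⟩ := pvFoldrB_head s ss
        have hs' : pvStepB s (List.foldr pvStepB [] ss) = (s :: u) :: cs := by
          simpa using hs
        have hfold : (r :: s :: ss).foldr pvStepB [] = pvStepB r ((s :: u) :: cs) := by
          simp [List.foldr_cons, hs']
        by_cases hbs : pvIsBoundary s
        · simp [pvAttach, hs, hfold, pvStepB, hbs, hb]
        · simp [pvAttach, hs, hfold, pvStepB, hbs, hb]

theorem pvRev_eq (lines : List String) :
    lines.reverse.foldl pvStepRev [] = ((lines.foldr pvStepB []).map (fun b => b.reverse)).reverse := by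
  induction lines with
  | nil => rfl
  | cons l ls ih =>
    rw [List.reverse_cons, List.foldl_append, List.foldl_cons, List.foldl_nil, ih]
    cases h : ls.foldr pvStepB [] with
    | nil => simp [pvStepRev, pvStepB, h]
    | cons b bs =>
      simp [pvStepRev, pvStepB, h, List.getLastD_eq_getLast?, List.getLast?_reverse]
      split_ifs <;> simp

theorem pvA_eq_foldrB (lines : List String) :
    split_into_task_blocks lines = lines.foldr pvStepB [] := by
  cases lines with
  | nil => rfl
  | cons l ls =>
    show (if ((l :: ls).foldl pvStepA ([], [])).2.isEmpty then _ else _) = _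
    have h0 : (l :: ls).foldl pvStepA ([], []) = ls.foldl pvStepA ([], [l]) := by
      simp [List.foldl, pvStepA_eq]
    rw [h0]
    have : pvFin (ls.foldl pvStepA ([], [l])) = pvAttach [l] ls := pvA_attach ls [l] (by simp)
    rw [show (if (ls.foldl pvStepA ([], [l])).2.isEmpty then (ls.foldl pvStepA ([], [l])).1
          else (ls.foldl pvStepA ([], [l])).1 ++ [(ls.foldl pvStepA ([], [l])).2]) =
          pvFin (ls.foldl pvStepA ([], [l])) from rfl, this]
    rw [← pvStepB_attach l ls]
    rfl

-- ===== VERDICT (by name: the statement is the Claim_ definition above) =====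
theorem split_into_task_blocks_spec : Claim_equal_split_into_task_blocks := by
  intro lines _
  unfold Spec_split_into_task_blocks
  rw [pvA_eq_foldrB, split_into_task_blocks_alt, pvRev_eq]
  simp
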